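-- pv_equiv track=rewrite | github.com/leolech14/standard-model-of-code | particle/src/core/pipeline/stages/atlas_emitter.py | _get_module_docstring
-- ===== SOURCE A (Python) =====
-- from typing import TYPE_CHECKING, Any, Dict, List, Optional
--
-- def _get_module_docstring(nodes: List[Dict[str, Any]]) -> str:
--     """Get the module-level docstring from nodes."""
--     for node in nodes:
--         if node.get("kind") == "module" and node.get("docstring"):
--             return node["docstring"]
--     # Fallback: first node with a docstring.
--     for node in nodes:
--         if node.get("docstring"):
--             return node["docstring"]
--     return ""
-- ===== SOURCE B (Python) =====
-- from typing import Any, Dict, List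
--
-- def _get_module_docstring(nodes: List[Dict[str, Any]]) -> str:
--     """Single pass: return a module node's docstring at once; remember the
--     first docstring seen as a fallback."""
--     fallback = ""
--     for node in nodes:
--         doc = node.get("docstring")
--         if doc and node.get("kind") == "module":
--             return doc
--         if doc and not fallback:
--             fallback = doc
--     return fallback
-- ===== Notes on version B (the rewrite author's own statement) =====
-- stated objective: simpler
-- what changed: Replaces A's two sequential scans (module pass, then fallback pass) by one pass that returns a module docstring immediately and keeps the first docstring seen in a fallback accumulator.
import Mathlib
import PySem

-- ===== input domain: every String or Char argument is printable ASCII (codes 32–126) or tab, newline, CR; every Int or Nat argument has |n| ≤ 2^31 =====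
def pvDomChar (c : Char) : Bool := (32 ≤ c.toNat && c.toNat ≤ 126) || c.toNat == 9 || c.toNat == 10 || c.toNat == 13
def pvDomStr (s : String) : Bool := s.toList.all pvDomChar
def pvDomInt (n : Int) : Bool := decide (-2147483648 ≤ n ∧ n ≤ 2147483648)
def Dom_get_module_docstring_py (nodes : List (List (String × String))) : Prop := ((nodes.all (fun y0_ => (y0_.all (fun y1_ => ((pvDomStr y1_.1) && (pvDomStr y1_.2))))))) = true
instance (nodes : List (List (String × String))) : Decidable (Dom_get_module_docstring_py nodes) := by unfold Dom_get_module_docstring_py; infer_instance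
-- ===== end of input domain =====

-- ===== PORT A =====
-- B fuses A's two scans into one pass with a fallback accumulator (same O(n) cost, one traversal).
-- loop 1 of A: first node whose kind is "module" and whose docstring is truthy
def pyLoop1 : List (List (String × String)) → Option String
  | [] => none
  | n :: t =>
    if (PySem.Dict.get? (PySem.Dict.mk n) "kind" == some "module") && ((PySem.Dict.get? (PySem.Dict.mk n) "docstring").getD "" != "") then
      some ((PySem.Dict.get? (PySem.Dict.mk n) "docstring").getD "")
    else pyLoop1 t

-- loop 2 of A: first node with a truthy docstring
def pyLoop2 : List (List (String × String)) → Option String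
  | [] => none
  | n :: t =>
    if (PySem.Dict.get? (PySem.Dict.mk n) "docstring").getD "" != "" then
      some ((PySem.Dict.get? (PySem.Dict.mk n) "docstring").getD "")
    else pyLoop2 t

def get_module_docstring_py (nodes : List (List (String × String))) : String :=
  match pyLoop1 nodes with
  | some d => d
  | none =>
    match pyLoop2 nodes with
    | some d => d
    | none => ""

-- ===== PORT B =====
def altGo : List (List (String × String)) → String → String
  | [], fallback => fallback
  | n :: t, fallback =>
    let doc := (PySem.Dict.get? (PySem.Dict.mk n) "docstring").getD ""
    if (doc != "") && (PySem.Dict.get? (PySem.Dict.mk n) "kind" == some "module") then doc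
    else altGo t (if (doc != "") && (fallback == "") then doc else fallback)

def get_module_docstring_py_alt (nodes : List (List (String × String))) : String :=
  altGo nodes ""

-- ===== PRECONDITION & SPEC =====
def Spec_get_module_docstring_py (nodes : List (List (String × String))) (out : String) : Prop := out = get_module_docstring_py_alt nodes
instance (nodes : List (List (String × String))) (out : String) : Decidable (Spec_get_module_docstring_py nodes out) := by unfold Spec_get_module_docstring_py; infer_instance

-- ===== CLAIM (what is proved, stated in full; the proofs are below) =====
def Claim_equal_get_module_docstring_py : Prop := ∀ (nodes : List (List (String × String))), Dom_get_module_docstring_py nodes → Spec_get_module_docstring_py nodes (get_module_docstring_py nodes)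

-- ===== LEMMAS AND PROOFS =====
-- invariant of B's single pass: a module hit wins; otherwise the fallback (first doc seen) wins
theorem altGo_eq (nodes : List (List (String × String))) (fb : String) :
    altGo nodes fb =
      (pyLoop1 nodes).getD (if fb ≠ "" then fb else (pyLoop2 nodes).getD fb) := by
  induction nodes generalizing fb with
  | nil => simp [altGo, pyLoop1, pyLoop2]
  | cons n t ih =>
    simp only [altGo, pyLoop1, pyLoop2]
    by_cases hd : (PySem.Dict.get? (PySem.Dict.mk n) "docstring").getD "" = ""
    · by_cases hk : PySem.Dict.get? (PySem.Dict.mk n) "kind" = some "module" <;>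
        simp [hd, hk, ih]
    · by_cases hk : PySem.Dict.get? (PySem.Dict.mk n) "kind" = some "module"
      · simp [hd, hk]
      · by_cases hfb : fb = "" <;> simp [hd, hk, hfb, ih]

-- ===== VERDICT (by name: the statement is the Claim_ definition above) =====
theorem get_module_docstring_py_spec : Claim_equal_get_module_docstring_py := by
  intro nodes _
  unfold Spec_get_module_docstring_py get_module_docstring_py get_module_docstring_py_alt
  rw [altGo_eq]
  cases h1 : pyLoop1 nodes <;> cases h2 : pyLoop2 nodes <;> simp
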